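-- pv_equiv track=rewrite | github.com/WalaaAlkady/Bioinformatics | ORFandRepetitiveSeq.py | max_and_min
-- ===== SOURCE A (Python) =====
-- def max_and_min (count,sequences,keys) :
--     maxi = []
--     mini = []
--     length_maxi=[]
--     length_mini=[]
--     minimum = 1000000
--     maximum = 0
--     length = count
--     for i in range(0,length,1):
--         seq = sequences[keys[i]]
--         length_of_seq = len(seq)
--         if length_of_seq > maximum :
--             maximum = length_of_seq
--             del maxi[0:]
--             del length_maxi[0:]
--             maxi.append(keys[i])
--             length_maxi.append(length_of_seq)
--         elif length_of_seq == maximum :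
--             maxi.append(keys[i])
--             length_maxi.append(length_of_seq)
--         if length_of_seq < minimum :
--             minimum = length_of_seq
--             del mini[0:]
--             del length_mini[0:]
--             mini.append(keys[i])
--             length_mini.append(length_of_seq)
--         elif length_of_seq == minimum :
--             mini.append(keys[i])
--             length_mini.append(length_of_seq)
--     return maxi , mini , length_mini , length_maxi
-- ===== SOURCE B (Python) =====
-- def max_and_min(count, sequences, keys):
--     if count <= 0:
--         return [], [], [], []
--     ks = keys[:count]
--     lengths = [len(sequences[k]) for k in ks]
--     maximum = max(lengths)
--     minimum = min(lengths)
--     maxi = [k for k, n in zip(ks, lengths) if n == maximum]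
--     mini = [k for k, n in zip(ks, lengths) if n == minimum]
--     return maxi, mini, [minimum] * len(mini), [maximum] * len(maxi)
-- ===== Notes on version B (the rewrite author's own statement) =====
-- stated objective: simpler
-- what changed: Replaces A's single stateful loop over six mutable accumulators with delete-and-restart resets by a two-phase decomposition: build the length list once, take its max and min, then select the tied keys with comprehensions; Pre_ additionally excludes inputs on which every selected sequence is longer than 1,000,000 characters, where A's minimum never drops below its 1000000 initializer and A returns an accidentally empty min group that B's genuine minimum does not reproduce.
import Mathlib
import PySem

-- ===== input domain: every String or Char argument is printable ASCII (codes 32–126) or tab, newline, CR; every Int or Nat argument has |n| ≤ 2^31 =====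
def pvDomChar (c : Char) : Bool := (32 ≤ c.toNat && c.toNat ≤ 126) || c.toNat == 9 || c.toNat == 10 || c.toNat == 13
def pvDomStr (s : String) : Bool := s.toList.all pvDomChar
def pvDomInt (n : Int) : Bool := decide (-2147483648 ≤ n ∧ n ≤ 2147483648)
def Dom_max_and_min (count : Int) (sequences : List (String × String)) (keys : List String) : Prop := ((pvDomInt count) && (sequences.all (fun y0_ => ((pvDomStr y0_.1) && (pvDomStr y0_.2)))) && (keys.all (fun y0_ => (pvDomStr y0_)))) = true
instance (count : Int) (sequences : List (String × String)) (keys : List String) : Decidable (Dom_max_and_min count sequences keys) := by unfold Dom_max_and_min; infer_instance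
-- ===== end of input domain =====

-- B replaces A's single stateful loop (six accumulators with delete-and-restart resets) by a
-- two-phase decomposition: build the length list once, take its max and min, then select the
-- tied keys by comprehension. Equivalence of RETURN values on Pre_.

-- ===== PORT A =====
def max_and_min (count : Int) (sequences : List (String × String)) (keys : List String) : List String × List String × List Int × List Int :=
  let st : List String × List Int × List String × List Int × Int × Int :=
    (PySem.List.pyRange 0 count 1).foldl (fun st i =>
      let (maxi, lmaxi, mini, lmini, minimum, maximum) := st
      let seq := PySem.Dict.getD (PySem.Dict.mk sequences) (PySem.List.pyGetD keys i "") ""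
      let L := PySem.Str.len seq
      let (maxi, lmaxi, maximum) :=
        if L > maximum then ([PySem.List.pyGetD keys i ""], [L], L)
        else if L = maximum then (maxi ++ [PySem.List.pyGetD keys i ""], lmaxi ++ [L], maximum)
        else (maxi, lmaxi, maximum)
      let (mini, lmini, minimum) :=
        if L < minimum then ([PySem.List.pyGetD keys i ""], [L], L)
        else if L = minimum then (mini ++ [PySem.List.pyGetD keys i ""], lmini ++ [L], minimum)
        else (mini, lmini, minimum)
      (maxi, lmaxi, mini, lmini, minimum, maximum))
      ([], [], [], [], 1000000, 0)
  (st.1, st.2.2.1, st.2.2.2.1, st.2.1)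

-- ===== PORT B =====
def max_and_min_alt (count : Int) (sequences : List (String × String)) (keys : List String) : List String × List String × List Int × List Int :=
  if count ≤ 0 then ([], [], [], [])
  else
    let ks := PySem.List.slice keys none (some count)
    let lengths := ks.map (fun k => PySem.Str.len (PySem.Dict.getD (PySem.Dict.mk sequences) k ""))
    -- Python's max/min raise ValueError on an empty list (reachable only outside Pre_);
    -- they are ported as a fold over head/tail, with a junk result on the empty list
    match lengths with
    | [] => ([], [], [], [])
    | h :: t =>
      let maximum := t.foldl max h
      let minimum := t.foldl min h
      let maxi := (ks.zip lengths).filterMap (fun p => if p.2 = maximum then some p.1 else none)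
      let mini := (ks.zip lengths).filterMap (fun p => if p.2 = minimum then some p.1 else none)
      (maxi, mini, List.replicate mini.length minimum, List.replicate maxi.length maximum)

-- ===== PRECONDITION & SPEC =====
-- Pre_ excludes (a) exactly the inputs where Python A raises: an index i < count beyond keys
-- (IndexError) or a key among the first count not present in sequences (KeyError); and
-- (b) inputs on which every selected sequence is longer than 1,000,000 characters: there A's
-- minimum never drops below its arbitrary 1000000 initializer and A's returned min group is
-- accidentally empty, an artefact of A's implementation that a natural re-implementation
-- (B returns the keys of the truly shortest sequences there) does not reproduce.
def Pre_max_and_min (count : Int) (sequences : List (String × String)) (keys : List String) : Prop :=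
  count ≤ (keys.length : Int) ∧
  (∀ k ∈ keys.take count.toNat, ((PySem.Dict.mk sequences).get? k).isSome) ∧
  (0 < count → ∃ k ∈ keys.take count.toNat,
    PySem.Str.len (PySem.Dict.getD (PySem.Dict.mk sequences) k "") ≤ 1000000)
instance (count : Int) (sequences : List (String × String)) (keys : List String) : Decidable (Pre_max_and_min count sequences keys) := by unfold Pre_max_and_min; infer_instance
def pvWitness_max_and_min : Int × (List (String × String)) × List String := (2, [("a", "xx"), ("b", "y")], ["a", "b"])

def Spec_max_and_min (count : Int) (sequences : List (String × String)) (keys : List String) (out : List String × List String × List Int × List Int) : Prop := out = max_and_min_alt count sequences keys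
instance (count : Int) (sequences : List (String × String)) (keys : List String) (out : List String × List String × List Int × List Int) : Decidable (Spec_max_and_min count sequences keys out) := by unfold Spec_max_and_min; infer_instance

-- ===== CLAIM (what is proved, stated in full; the proofs are below) =====
def Claim_equal_max_and_min : Prop := ∀ (count : Int) (sequences : List (String × String)) (keys : List String), Dom_max_and_min count sequences keys → Pre_max_and_min count sequences keys → Spec_max_and_min count sequences keys (max_and_min count sequences keys)

-- ===== LEMMAS AND PROOFS =====

-- the length Python computes for key k
def pvLen (s : List (String × String)) (k : String) : Int :=
  PySem.Str.len (PySem.Dict.getD (PySem.Dict.mk s) k "")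

-- A's loop body, abstracted over the key it reads
def pvBody (s : List (String × String)) (st : List String × List Int × List String × List Int × Int × Int) (k : String) : List String × List Int × List String × List Int × Int × Int :=
  let (maxi, lmaxi, mini, lmini, minimum, maximum) := st
  let L := pvLen s k
  let (maxi, lmaxi, maximum) :=
    if L > maximum then ([k], [L], L)
    else if L = maximum then (maxi ++ [k], lmaxi ++ [L], maximum)
    else (maxi, lmaxi, maximum)
  let (mini, lmini, minimum) :=
    if L < minimum then ([k], [L], L)
    else if L = minimum then (mini ++ [k], lmini ++ [L], minimum)
    else (mini, lmini, minimum)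
  (maxi, lmaxi, mini, lmini, minimum, maximum)

def pvM (s : List (String × String)) (p : List String) : Int :=
  (p.map (pvLen s)).foldl max 0
def pvm (s : List (String × String)) (p : List String) : Int :=
  (p.map (pvLen s)).foldl min 1000000
-- B's head-seeded max and min of the length list
def pvM' (s : List (String × String)) (p : List String) : Int :=
  match p.map (pvLen s) with | [] => 0 | h :: t => t.foldl max h
def pvm' (s : List (String × String)) (p : List String) : Int :=
  match p.map (pvLen s) with | [] => 0 | h :: t => t.foldl min h
def pvSel (s : List (String × String)) (v : Int) (p : List String) : List String :=
  p.filterMap (fun k => if pvLen s k = v then some k else none)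
def pvCanon (s : List (String × String)) (p : List String) : List String × List Int × List String × List Int × Int × Int :=
  (pvSel s (pvM s p) p, List.replicate (pvSel s (pvM s p) p).length (pvM s p),
   pvSel s (pvm s p) p, List.replicate (pvSel s (pvm s p) p).length (pvm s p),
   pvm s p, pvM s p)
def pvOut (s : List (String × String)) (p : List String) : List String × List String × List Int × List Int :=
  (pvSel s (pvM s p) p, pvSel s (pvm s p) p,
   List.replicate (pvSel s (pvm s p) p).length (pvm s p),
   List.replicate (pvSel s (pvM s p) p).length (pvM s p))
def pvOut' (s : List (String × String)) (p : List String) : List String × List String × List Int × List Int :=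
  (pvSel s (pvM' s p) p, pvSel s (pvm' s p) p,
   List.replicate (pvSel s (pvm' s p) p).length (pvm' s p),
   List.replicate (pvSel s (pvM' s p) p).length (pvM' s p))

def pvStepMax (s : List (String × String)) (maxi : List String) (lmaxi : List Int) (maximum : Int) (k : String) : List String × List Int × Int :=
  let L := pvLen s k
  if L > maximum then ([k], [L], L)
  else if L = maximum then (maxi ++ [k], lmaxi ++ [L], maximum)
  else (maxi, lmaxi, maximum)

def pvStepMin (s : List (String × String)) (mini : List String) (lmini : List Int) (minimum : Int) (k : String) : List String × List Int × Int :=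
  let L := pvLen s k
  if L < minimum then ([k], [L], L)
  else if L = minimum then (mini ++ [k], lmini ++ [L], minimum)
  else (mini, lmini, minimum)

theorem pvBody_eq (s : List (String × String)) (a : List String) (b : List Int)
    (c : List String) (d : List Int) (mn mx : Int) (k : String) :
    pvBody s (a, b, c, d, mn, mx) k =
      ((pvStepMax s a b mx k).1, (pvStepMax s a b mx k).2.1,
       (pvStepMin s c d mn k).1, (pvStepMin s c d mn k).2.1,
       (pvStepMin s c d mn k).2.2, (pvStepMax s a b mx k).2.2) := by
  simp only [pvBody, pvStepMax, pvStepMin]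

theorem foldl_min_le (t : List Int) (a : Int) :
    t.foldl min a ≤ a ∧ ∀ y ∈ t, t.foldl min a ≤ y := by
  induction t generalizing a with
  | nil => simp
  | cons x xs ih =>
    constructor
    · exact le_trans (ih (min a x)).1 (min_le_left _ _)
    · intro y hy
      rcases List.mem_cons.1 hy with rfl | hy
      · exact le_trans (ih (min a y)).1 (min_le_right _ _)
      · exact (ih (min a x)).2 _ hy

theorem foldl_min_comm (t : List Int) (a b : Int) :
    min (t.foldl min a) b = t.foldl min (min a b) := by
  induction t generalizing a with
  | nil => rfl
  | cons x xs ih =>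
    simp only [List.foldl_cons]
    rw [ih, min_right_comm]

theorem pvM_append (s : List (String × String)) (p : List String) (k : String) :
    pvM s (p ++ [k]) = max (pvM s p) (pvLen s k) := by
  simp [pvM, List.foldl_append]

theorem pvm_append (s : List (String × String)) (p : List String) (k : String) :
    pvm s (p ++ [k]) = min (pvm s p) (pvLen s k) := by
  simp [pvm, List.foldl_append]

theorem mem_le_pvM (s : List (String × String)) (p : List String) (x : String) (hx : x ∈ p) :
    pvLen s x ≤ pvM s p :=
  (PySem.List.le_foldl_max _ _).2 _ (List.mem_map_of_mem hx)

theorem pvm_le_mem (s : List (String × String)) (p : List String) (x : String) (hx : x ∈ p) :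
    pvm s p ≤ pvLen s x :=
  (foldl_min_le _ _).2 _ (List.mem_map_of_mem hx)

theorem pvSel_append (s : List (String × String)) (v : Int) (p : List String) (k : String) :
    pvSel s v (p ++ [k]) = pvSel s v p ++ (if pvLen s k = v then [k] else []) := by
  simp only [pvSel, List.filterMap_append, List.filterMap]
  split_ifs <;> simp

theorem pvSel_eq_nil (s : List (String × String)) (v : Int) (p : List String)
    (h : ∀ x ∈ p, pvLen s x ≠ v) : pvSel s v p = [] := by
  rw [pvSel, List.filterMap_eq_nil_iff]
  intro x hx
  simp [h x hx]

theorem pvStepMax_canon (s : List (String × String)) (p : List String) (k : String) :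
    pvStepMax s (pvSel s (pvM s p) p) (List.replicate (pvSel s (pvM s p) p).length (pvM s p)) (pvM s p) k =
      (pvSel s (pvM s (p ++ [k])) (p ++ [k]),
       List.replicate (pvSel s (pvM s (p ++ [k])) (p ++ [k])).length (pvM s (p ++ [k])),
       pvM s (p ++ [k])) := by
  have hM := pvM_append s p k
  rcases lt_trichotomy (pvLen s k) (pvM s p) with hlt | heq | hgt
  · have hM' : pvM s (p ++ [k]) = pvM s p := by rw [hM, max_eq_left hlt.le]
    have hsel : pvSel s (pvM s (p ++ [k])) (p ++ [k]) = pvSel s (pvM s p) p := by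
      rw [hM', pvSel_append]; simp [hlt.ne]
    rw [hsel, hM', pvStepMax]
    rw [if_neg (by simp only [gt_iff_lt, not_lt]; exact hlt.le), if_neg hlt.ne]
  · have hM' : pvM s (p ++ [k]) = pvM s p := by rw [hM, heq, max_self]
    have hsel : pvSel s (pvM s (p ++ [k])) (p ++ [k]) = pvSel s (pvM s p) p ++ [k] := by
      rw [hM', pvSel_append]; simp [heq]
    rw [hsel, hM', pvStepMax]
    rw [if_neg (by simp only [gt_iff_lt, not_lt]; exact heq.le), if_pos heq, heq]
    simp [List.replicate_succ']
  · have hM' : pvM s (p ++ [k]) = pvLen s k := by rw [hM, max_eq_right hgt.le]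
    have hsel : pvSel s (pvM s (p ++ [k])) (p ++ [k]) = [k] := by
      rw [hM', pvSel_append]
      rw [pvSel_eq_nil s _ p
        (fun x hx hc => absurd (mem_le_pvM s p x hx) (by rw [hc]; exact not_le.2 hgt))]
      simp
    rw [hsel, hM', pvStepMax, if_pos hgt]
    simp

theorem pvStepMin_canon (s : List (String × String)) (p : List String) (k : String) :
    pvStepMin s (pvSel s (pvm s p) p) (List.replicate (pvSel s (pvm s p) p).length (pvm s p)) (pvm s p) k =
      (pvSel s (pvm s (p ++ [k])) (p ++ [k]),
       List.replicate (pvSel s (pvm s (p ++ [k])) (p ++ [k])).length (pvm s (p ++ [k])),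
       pvm s (p ++ [k])) := by
  have hm := pvm_append s p k
  rcases lt_trichotomy (pvLen s k) (pvm s p) with hlt | heq | hgt
  · have hm' : pvm s (p ++ [k]) = pvLen s k := by rw [hm, min_eq_right hlt.le]
    have hsel : pvSel s (pvm s (p ++ [k])) (p ++ [k]) = [k] := by
      rw [hm', pvSel_append]
      rw [pvSel_eq_nil s _ p
        (fun x hx hc => absurd (pvm_le_mem s p x hx) (by rw [hc]; exact not_le.2 hlt))]
      simp
    rw [hsel, hm', pvStepMin, if_pos hlt]
    simp
  · have hm' : pvm s (p ++ [k]) = pvm s p := by rw [hm, heq, min_self]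
    have hsel : pvSel s (pvm s (p ++ [k])) (p ++ [k]) = pvSel s (pvm s p) p ++ [k] := by
      rw [hm', pvSel_append]; simp [heq]
    rw [hsel, hm', pvStepMin]
    rw [if_neg (by simp only [not_lt]; exact heq.ge), if_pos heq, heq]
    simp [List.replicate_succ']
  · have hm' : pvm s (p ++ [k]) = pvm s p := by rw [hm, min_eq_left hgt.le]
    have hsel : pvSel s (pvm s (p ++ [k])) (p ++ [k]) = pvSel s (pvm s p) p := by
      rw [hm', pvSel_append]; simp [hgt.ne']
    rw [hsel, hm', pvStepMin]
    rw [if_neg (by simp only [not_lt]; exact hgt.le), if_neg hgt.ne']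

theorem pvCanon_step (s : List (String × String)) (p : List String) (k : String) :
    pvBody s (pvCanon s p) k = pvCanon s (p ++ [k]) := by
  show pvBody s (pvSel s (pvM s p) p, List.replicate (pvSel s (pvM s p) p).length (pvM s p),
      pvSel s (pvm s p) p, List.replicate (pvSel s (pvm s p) p).length (pvm s p),
      pvm s p, pvM s p) k = pvCanon s (p ++ [k])
  rw [pvBody_eq, pvStepMax_canon, pvStepMin_canon]
  rfl

theorem pvLoop_canon (s : List (String × String)) (ks p : List String) :
    ks.foldl (pvBody s) (pvCanon s p) = pvCanon s (p ++ ks) := by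
  induction ks generalizing p with
  | nil => simp
  | cons k kt ih =>
    simp only [List.foldl_cons, pvCanon_step]
    rw [ih (p ++ [k]), List.append_assoc]; rfl

theorem zip_self_map {α β : Type} (l : List α) (f : α → β) :
    l.zip (l.map f) = l.map (fun x => (x, f x)) := by
  induction l with
  | nil => rfl
  | cons x xs ih => simp [ih]

theorem sel_eq_filterMap_zip (s : List (String × String)) (v : Int) (ks : List String) :
    ((ks.zip (ks.map (pvLen s))).filterMap
        (fun p => if p.2 = v then some p.1 else none)) = pvSel s v ks := by
  rw [zip_self_map ks (pvLen s), List.filterMap_map]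
  rfl

theorem pvLen_nonneg (s : List (String × String)) (k : String) : 0 ≤ pvLen s k := by
  rw [pvLen, PySem.Str.len_eq]; positivity

-- A's result is pvOut of the first count keys
theorem A_eq_pvOut (count : Int) (sequences : List (String × String)) (keys : List String)
    (hcount : count ≤ (keys.length : Int)) :
    max_and_min count sequences keys = pvOut sequences (keys.take count.toNat) := by
  unfold max_and_min
  by_cases hc : count ≤ 0
  · rw [PySem.List.pyRange_one_eq_nil hc]
    have : count.toNat = 0 := by omega
    simp [this, pvOut, pvSel, pvM, pvm]
  · rw [not_le] at hc
    set ks := keys.take count.toNat with hks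
    have hlen : (ks.length : Int) = count := by
      simp [hks, List.length_take]; omega
    have hfold : (PySem.List.pyRange 0 count 1).foldl (fun st i =>
        pvBody sequences st (PySem.List.pyGetD keys i "")) (pvCanon sequences []) =
        ks.foldl (pvBody sequences) (pvCanon sequences []) := by
      rw [← hlen]
      rw [PySem.List.foldl_congr_mem _ _
        (fun st i => pvBody sequences st (PySem.List.pyGetD ks i "")) _ ?_]
      · exact PySem.List.foldl_pyRange_zero_pyGetD' ks "" (pvBody sequences) _
      · intro acc i hi
        rw [PySem.List.mem_pyRange_one] at hi
        congr 1
        rw [PySem.List.pyGetD_eq_getElem keys "" hi.1 (by omega),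
            PySem.List.pyGetD_eq_getElem ks "" hi.1 (by exact_mod_cast hi.2)]
        exact (List.getElem_take).symm
    have hA : (PySem.List.pyRange 0 count 1).foldl (fun st i =>
        pvBody sequences st (PySem.List.pyGetD keys i "")) (pvCanon sequences []) =
        pvCanon sequences ks := by
      rw [hfold, pvLoop_canon]; simp
    rw [show (fun (st : List String × List Int × List String × List Int × Int × Int) (i : Int) =>
          let (maxi, lmaxi, mini, lmini, minimum, maximum) := st
          let seq := PySem.Dict.getD (PySem.Dict.mk sequences) (PySem.List.pyGetD keys i "") ""
          let L := PySem.Str.len seq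
          let (maxi, lmaxi, maximum) :=
            if L > maximum then ([PySem.List.pyGetD keys i ""], [L], L)
            else if L = maximum then (maxi ++ [PySem.List.pyGetD keys i ""], lmaxi ++ [L], maximum)
            else (maxi, lmaxi, maximum)
          let (mini, lmini, minimum) :=
            if L < minimum then ([PySem.List.pyGetD keys i ""], [L], L)
            else if L = minimum then (mini ++ [PySem.List.pyGetD keys i ""], lmini ++ [L], minimum)
            else (mini, lmini, minimum)
          (maxi, lmaxi, mini, lmini, minimum, maximum)) =
        (fun st i => pvBody sequences st (PySem.List.pyGetD keys i "")) from rfl]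
    rw [show ([], [], [], [], (1000000 : Int), (0 : Int)) = pvCanon sequences [] from rfl, hA]
    rfl

-- B's result is pvOut' of the first count keys (for positive count within keys)
theorem B_eq_pvOut' (count : Int) (sequences : List (String × String)) (keys : List String)
    (hpos : 0 < count) (hcount : count ≤ (keys.length : Int)) :
    max_and_min_alt count sequences keys = pvOut' sequences (keys.take count.toNat) := by
  unfold max_and_min_alt
  rw [if_neg (by omega)]
  rw [PySem.List.slice_to keys hpos.le]
  set ks := keys.take count.toNat with hks
  have hksne : ks ≠ [] := by
    have : ks.length = count.toNat := by simp [hks, List.length_take]; omega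
    intro h; rw [h] at this; simp at this; omega
  obtain ⟨k0, kt, hk0⟩ := List.exists_cons_of_ne_nil hksne
  rw [hk0]
  rw [show (fun k => PySem.Str.len (PySem.Dict.getD (PySem.Dict.mk sequences) k "")) = pvLen sequences from rfl]
  simp only [List.map_cons]
  rw [← List.map_cons, ← hk0, sel_eq_filterMap_zip, sel_eq_filterMap_zip]
  have hM' : (kt.map (pvLen sequences)).foldl max (pvLen sequences k0) = pvM' sequences ks := by
    rw [pvM', hk0]; simp
  have hm' : (kt.map (pvLen sequences)).foldl min (pvLen sequences k0) = pvm' sequences ks := by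
    rw [pvm', hk0]; simp
  rw [hM', hm']
  rfl

-- on a nonempty list the head-seeded max agrees with A's 0-seeded max
theorem pvM'_eq_pvM (s : List (String × String)) (k0 : String) (kt : List String) :
    pvM' s (k0 :: kt) = pvM s (k0 :: kt) := by
  rw [pvM', pvM]
  simp only [List.map_cons, List.foldl_cons]
  rw [max_eq_right (pvLen_nonneg s k0)]

-- when some selected sequence has length ≤ 1000000, B's min agrees with A's 1000000-seeded min
theorem pvm'_eq_pvm (s : List (String × String)) (k0 : String) (kt : List String)
    (x : String) (hx : x ∈ k0 :: kt) (hle : pvLen s x ≤ 1000000) :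
    pvm' s (k0 :: kt) = pvm s (k0 :: kt) := by
  rw [pvm', pvm]
  simp only [List.map_cons, List.foldl_cons]
  have hle2 : (kt.map (pvLen s)).foldl min (pvLen s k0) ≤ 1000000 := by
    rcases List.mem_cons.1 hx with rfl | hx'
    · exact le_trans (foldl_min_le _ _).1 hle
    · exact le_trans ((foldl_min_le _ _).2 _ (List.mem_map_of_mem hx')) hle
  calc (kt.map (pvLen s)).foldl min (pvLen s k0)
      = min ((kt.map (pvLen s)).foldl min (pvLen s k0)) 1000000 := (min_eq_left hle2).symm
    _ = (kt.map (pvLen s)).foldl min (min (pvLen s k0) 1000000) := foldl_min_comm _ _ _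
    _ = (kt.map (pvLen s)).foldl min (min 1000000 (pvLen s k0)) := by rw [min_comm]

-- ===== VERDICT (by name: the statement is the Claim_ definition above) =====
theorem max_and_min_spec : Claim_equal_max_and_min := by
  intro count sequences keys _ hpre
  obtain ⟨hcount, -, hwit⟩ := hpre
  unfold Spec_max_and_min
  rw [A_eq_pvOut count sequences keys hcount]
  by_cases hc : count ≤ 0
  · have : count.toNat = 0 := by omega
    unfold max_and_min_alt
    rw [if_pos hc]
    simp [this, pvOut, pvSel, pvM, pvm]
  · rw [not_le] at hc
    rw [B_eq_pvOut' count sequences keys hc hcount]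
    set ks := keys.take count.toNat with hks
    have hksne : ks ≠ [] := by
      have : ks.length = count.toNat := by simp [hks, List.length_take]; omega
      intro h; rw [h] at this; simp at this; omega
    obtain ⟨k0, kt, hk0⟩ := List.exists_cons_of_ne_nil hksne
    obtain ⟨x, hxmem, hxle⟩ := hwit hc
    rw [pvOut, pvOut', hk0, pvM'_eq_pvM, pvm'_eq_pvm sequences k0 kt x (hk0 ▸ hxmem) hxle]
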